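-- pv_equiv track=rewrite | github.com/format37/avax-pw-crack | python/tests/phrase_generator/phrase_gen.py | get_next_variant
-- ===== SOURCE A (Python) =====
-- def get_next_variant(current, alphabet):
--     # Convert current variant to list for easier manipulation
--     chars = list(current)
--
--     # Start from rightmost position
--     pos = len(chars) - 1
--
--     while pos >= 0:
--         # Find current char position in alphabet
--         current_char_index = alphabet.index(chars[pos])
--
--         # If we haven't reached the last character in alphabet
--         if current_char_index < len(alphabet) - 1:
--             # Replace current char with next char in alphabet
--             chars[pos] = alphabet[current_char_index + 1]
--             return ''.join(chars)
--         else: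
--             # Reset current position to first char and continue with next position
--             chars[pos] = alphabet[0]
--             pos -= 1
--
--     # If we're here, we need to add one more character
--     return alphabet[0] * (len(current) + 1)
-- ===== SOURCE B (Python) =====
-- def get_next_variant(current, alphabet):
--     last = alphabet[-1]
--     stripped = current.rstrip(last)
--     if not stripped:
--         return alphabet[0] * (len(current) + 1)
--     idx = alphabet.index(stripped[-1])
--     return stripped[:-1] + alphabet[idx + 1] + alphabet[0] * (len(current) - len(stripped))
-- ===== Notes on version B (the rewrite author's own statement) =====
-- stated objective: simpler
-- what changed: Replaces the char-by-char carry loop (scan right-to-left, resetting wrapped positions one at a time) with a single rstrip of the alphabet's last character followed by one direct reconstruction: kept prefix + incremented char + a run of first characters.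
-- outside the precondition, e.g. on get_next_variant('a', 'aba'): A returns 'b', B returns 'aa'
import Mathlib
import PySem

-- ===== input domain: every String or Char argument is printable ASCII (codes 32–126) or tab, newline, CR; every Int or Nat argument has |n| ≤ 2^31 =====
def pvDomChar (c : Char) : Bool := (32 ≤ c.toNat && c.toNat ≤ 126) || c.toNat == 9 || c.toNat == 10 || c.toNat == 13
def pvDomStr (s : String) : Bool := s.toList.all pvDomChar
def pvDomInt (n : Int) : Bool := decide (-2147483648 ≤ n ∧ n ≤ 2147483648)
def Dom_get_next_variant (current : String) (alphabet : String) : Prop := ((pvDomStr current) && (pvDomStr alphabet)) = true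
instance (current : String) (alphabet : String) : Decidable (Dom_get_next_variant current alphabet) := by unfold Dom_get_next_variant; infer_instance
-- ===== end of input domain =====

-- B replaces A's right-to-left carry loop by one rstrip of the alphabet's last char and a single reconstruction (objective: simpler).

-- ===== PORT A =====
-- the while loop, counting pos+1 down; `none` = the ValueError of alphabet.index / IndexError of alphabet[0]
def gnvLoopA (al : List Char) : List Char → Nat → Option (List Char)
  | chars, 0 =>
      if al = [] then none   -- alphabet[0] raises IndexError
      else some (List.replicate (chars.length + 1) (al.getD 0 ' '))
  | chars, k+1 =>
      match PySem.List.index? al (chars.getD k ' ') with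
      | none => none         -- ValueError
      | some i =>
        if i < al.length - 1 then
          some (chars.set k (al.getD (i+1) ' '))
        else gnvLoopA al (chars.set k (al.getD 0 ' ')) k

def get_next_variant (current : String) (alphabet : String) : String :=
  match gnvLoopA alphabet.toList current.toList current.toList.length with
  | none => ""               -- A raises here; excluded by Pre_
  | some cs => String.mk cs

-- ===== PORT B =====
def get_next_variant_alt (current : String) (alphabet : String) : String :=
  match alphabet.toList.getLast? with
  | none => ""               -- alphabet[-1] raises IndexError; excluded by Pre_
  | some last =>
    let cs := current.toList
    -- current.rstrip(last): exact for a one-character strip set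
    let stripped := (cs.reverse.dropWhile (· == last)).reverse
    if stripped = [] then String.mk (List.replicate (cs.length + 1) (alphabet.toList.getD 0 ' '))
    else
      match PySem.List.index? alphabet.toList (stripped.getLastD ' ') with
      | none => ""           -- alphabet.index raises ValueError; excluded by Pre_
      | some idx =>
        String.mk (stripped.dropLast ++ [alphabet.toList.getD (idx+1) ' ']
                   ++ List.replicate (cs.length - stripped.length) (alphabet.toList.getD 0 ' '))

-- ===== PRECONDITION & SPEC =====
-- Pre_ excludes (a) inputs where A raises (empty alphabet, or the char at the carry position not in the
-- alphabet) and (b) the malformed-alphabet corner where the alphabet's last letter ALSO occurs earlier in the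
-- alphabet and current ends with that letter: there A's first-occurrence index test never treats it as a carry
-- while any rstrip reading does, and either value is defensible (e.g. current="a", alphabet="aba").
def Pre_get_next_variant (current : String) (alphabet : String) : Prop :=
  alphabet.toList ≠ [] ∧
  (alphabet.toList.getLastD ' ' ∈ alphabet.toList.dropLast →
    current.toList.reverse.takeWhile (· == alphabet.toList.getLastD ' ') = []) ∧
  (let t := current.toList.reverse.dropWhile (· == alphabet.toList.getLastD ' ')
   t = [] ∨ t.headD ' ' ∈ alphabet.toList)
instance (current : String) (alphabet : String) : Decidable (Pre_get_next_variant current alphabet) := by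
  unfold Pre_get_next_variant; infer_instance

def pvWitness_get_next_variant : String × String := ("ab", "abc")

def Spec_get_next_variant (current : String) (alphabet : String) (out : String) : Prop := out = get_next_variant_alt current alphabet
instance (current : String) (alphabet : String) (out : String) : Decidable (Spec_get_next_variant current alphabet out) := by unfold Spec_get_next_variant; infer_instance

-- ===== CLAIM (what is proved, stated in full; the proofs are below) =====
def Claim_equal_get_next_variant : Prop := ∀ (current : String) (alphabet : String), Dom_get_next_variant current alphabet → Pre_get_next_variant current alphabet → Spec_get_next_variant current alphabet (get_next_variant current alphabet)

-- ===== LEMMAS AND PROOFS =====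

-- index of the last element of a Nodup list
lemma index?_getLast {al : List Char} (h0 : al ≠ []) (hnotmem : al.getLast h0 ∉ al.dropLast) :
    PySem.List.index? al (al.getLast h0) = some (al.length - 1) := by
  have hdec : al.dropLast ++ [al.getLast h0] = al := List.dropLast_append_getLast h0
  calc PySem.List.index? al (al.getLast h0)
      = PySem.List.index? (al.dropLast ++ [al.getLast h0]) (al.getLast h0) := by rw [hdec]
    _ = some al.dropLast.length := PySem.List.index?_append_singleton_self _ _ hnotmem
    _ = some (al.length - 1) := by rw [List.length_dropLast]

-- the closed form of A's loop, under a Nodup alphabet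
lemma gnvLoopA_closed (al : List Char) (h0 : al ≠ []) :
    ∀ (k : Nat) (chars : List Char), k ≤ chars.length →
    (al.getLast h0 ∈ al.dropLast → (chars.take k).reverse.takeWhile (· == al.getLast h0) = []) →
    (let t := (chars.take k).reverse.dropWhile (· == al.getLast h0)
     t = [] ∨ t.headD ' ' ∈ al) →
    gnvLoopA al chars k =
      (let t := (chars.take k).reverse.dropWhile (· == al.getLast h0)
       if t = [] then some (List.replicate (chars.length + 1) (al.getD 0 ' '))
       else
         match PySem.List.index? al (t.headD ' ') with
         | none => none
         | some i =>
           some (t.tail.reverse ++ [al.getD (i+1) ' ']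
                 ++ List.replicate (k - t.length) (al.getD 0 ' ') ++ chars.drop k)) := by
  intro k
  induction k with
  | zero =>
    intro chars _ _ _
    simp [gnvLoopA, h0]
  | succ k ih =>
    intro chars hk hu hpre
    have hklt : k < chars.length := hk
    have htake : (chars.take (k+1)).reverse = chars[k] :: (chars.take k).reverse := by
      rw [List.take_succ]
      simp [List.getElem?_eq_getElem hklt]
    have hget : chars.getD k ' ' = chars[k] := List.getD_eq_getElem chars ' ' hklt
    by_cases hc : chars[k] = al.getLast h0
    · -- carry: this position holds the alphabet's last char
      have hdw : (chars.take (k+1)).reverse.dropWhile (· == al.getLast h0)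
               = (chars.take k).reverse.dropWhile (· == al.getLast h0) := by
        rw [htake, hc, List.dropWhile_cons_of_pos (by simp [hc])]
      have hnotmem : al.getLast h0 ∉ al.dropLast := by
        intro hm
        have h1 := hu hm
        rw [htake, List.takeWhile_cons_of_pos (by simp [hc])] at h1
        exact absurd h1 (by simp)
      have hidx : PySem.List.index? al chars[k] = some (al.length - 1) := by
        rw [hc]; exact index?_getLast h0 hnotmem
      have hne : ¬ (al.length - 1 < al.length - 1) := lt_irrefl _
      have hstep : gnvLoopA al chars (k+1)
                 = gnvLoopA al (chars.set k (al.getD 0 ' ')) k := by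
        simp only [gnvLoopA, hget, hidx, hne, if_false]
      rw [hstep]
      have hlen : (chars.set k (al.getD 0 ' ')).length = chars.length := by simp
      have htk : (chars.set k (al.getD 0 ' ')).take k = chars.take k := by
        rw [List.take_set]
        exact List.set_eq_of_length_le (by simp)
      have hdr : (chars.set k (al.getD 0 ' ')).drop k = al.getD 0 ' ' :: chars.drop (k+1) := by
        rw [List.drop_eq_getElem_cons (by simpa using hklt)]
        congr 1
        · simp [hklt]
        · rw [List.drop_set]
          simp
      have hpre' : (let t := ((chars.set k (al.getD 0 ' ')).take k).reverse.dropWhile (· == al.getLast h0)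
                    t = [] ∨ t.headD ' ' ∈ al) := by
        simpa only [htk, hdw] using hpre
      rw [ih (chars.set k (al.getD 0 ' ')) (by omega) (fun hm => absurd hm hnotmem) hpre']
      simp only [htk, hdw, hlen]
      set t := (chars.take k).reverse.dropWhile (· == al.getLast h0) with ht
      by_cases hte : t = []
      · simp [hte]
      · have htlen : t.length ≤ k := by
          have h1 : t.length ≤ (chars.take k).reverse.length := by
            rw [ht]; exact List.length_dropWhile_le _ _
          simpa [min_eq_left (le_of_lt hklt)] using h1
        simp only [hte, if_false]
        cases hI : PySem.List.index? al (t.headD ' ') with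
        | none => rfl
        | some i =>
          congr 1
          rw [hdr]
          have harith : k + 1 - t.length = (k - t.length) + 1 := by omega
          rw [harith, List.replicate_succ']
          simp
    · -- increment: this position's char is not the alphabet's last char
      have hdw : (chars.take (k+1)).reverse.dropWhile (· == al.getLast h0)
               = chars[k] :: (chars.take k).reverse := by
        rw [htake, List.dropWhile_cons_of_neg (by simp [hc])]
      have hmem : chars[k] ∈ al := by
        rcases hpre with h | h
        · exact absurd (hdw ▸ h) (by simp)
        · simpa [hdw] using h
      obtain ⟨i, hI⟩ := (PySem.List.index?_isSome_iff (xs := al) (v := chars[k])).mpr hmem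
                        |> Option.isSome_iff_exists.mp
      obtain ⟨hilt, hieq, _⟩ := PySem.List.getElem_of_index?_eq_some hI
      have hine : i ≠ al.length - 1 := by
        intro he
        apply hc
        subst he
        rw [← hieq, List.getLast_eq_getElem h0]
      have hilt' : i < al.length - 1 := by omega
      have hstep : gnvLoopA al chars (k+1)
                 = some (chars.set k (al.getD (i+1) ' ')) := by
        simp only [gnvLoopA, hget, hI, hilt', if_true]
      rw [hstep]
      simp only [hdw]
      have hne : chars[k] :: (chars.take k).reverse ≠ [] := by simp
      simp only [hne, if_false]
      have hhead : (chars[k] :: (chars.take k).reverse).headD ' ' = chars[k] := rfl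
      rw [hhead, hI]
      have hlen : (chars[k] :: (chars.take k).reverse).length = k + 1 := by
        simp [min_eq_left (le_of_lt hklt)]
      rw [hlen]
      simp only [List.tail_cons, List.reverse_reverse, Nat.sub_self, List.replicate_zero]
      simp [List.set_eq_take_append_cons_drop, hklt]

lemma rev_getLastD (t : List Char) : t.reverse.getLastD ' ' = t.headD ' ' := by
  cases t <;> simp [List.getLastD_eq_getLast?]

lemma rev_dropLast (t : List Char) : t.reverse.dropLast = t.tail.reverse := by
  cases t with
  | nil => rfl
  | cons a l => simp

-- ===== VERDICT (by name: the statement is the Claim_ definition above) =====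
theorem get_next_variant_spec : Claim_equal_get_next_variant := by
  intro current alphabet _ hpre
  obtain ⟨h0, hu, hpre3⟩ := hpre
  have hlast? : alphabet.toList.getLast? = some (alphabet.toList.getLast h0) :=
    List.getLast?_eq_some_getLast h0
  have hlastD : alphabet.toList.getLastD ' ' = alphabet.toList.getLast h0 := by
    rw [List.getLastD_eq_getLast?, hlast?]; rfl
  rw [hlastD] at hpre3 hu
  have hcover := gnvLoopA_closed alphabet.toList h0 current.toList.length current.toList
      (le_refl _) (by simpa only [List.take_length] using hu)
      (by simpa only [List.take_length] using hpre3)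
  rw [List.take_length, List.drop_length] at hcover
  unfold Spec_get_next_variant get_next_variant get_next_variant_alt
  rw [hcover, hlast?]
  simp only []
  have htlen : (List.dropWhile (fun x => x == alphabet.toList.getLast h0) current.toList.reverse).length
      ≤ current.toList.length := by
    simpa using List.length_dropWhile_le (fun x => x == alphabet.toList.getLast h0) current.toList.reverse
  rw [show (fun x => x == alphabet.toList.getLast h0) = (· == alphabet.toList.getLast h0) from rfl] at hpre3 hcover htlen ⊢
  generalize hT : List.dropWhile (· == alphabet.toList.getLast h0) current.toList.reverse = t at hpre3 htlen ⊢
  by_cases hte : t = []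
  · subst hte
    simp
  · have hrevne : ¬ t.reverse = [] := by simpa using hte
    rw [if_neg hte, if_neg hrevne, rev_getLastD]
    cases hI : PySem.List.index? alphabet.toList (t.headD ' ') with
    | none =>
      rcases hpre3 with h | h
      · exact absurd h hte
      · have hmem : t.headD ' ' ∈ alphabet.toList := by simpa using h
        exact absurd ((PySem.List.index?_eq_none_iff _ _).mp hI) (by simpa using hmem)
    | some i =>
      simp only []
      rw [rev_dropLast, List.length_reverse]
      simp
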